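-- pv_equiv track=rewrite | github.com/linhdvu14/cp-sols | sols/CodeForces/practice/D_Inconvenient_Pairs.py | solve
-- ===== SOURCE A (Python) =====
-- from bisect import bisect_left
--
-- def solve(N, M, K, X, Y, pts):
--     grp_x, grp_y = [], []
--     for x, y in pts:
--         i = bisect_left(X, x)
--         j = bisect_left(Y, y)
--         if X[i] == x and Y[j] == y: continue
--         if X[i] == x: grp_x.append((x, j))
--         else: grp_y.append((y, i))
--
--     grp_x.sort()
--     sy, dy = [0] * M, [0] * M
--     prev, cnt = -1, {}
--     for x, i in grp_x:
--         if prev != -1 and x != prev: cnt.clear()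
--         sy[i] += 1
--         dy[i] += cnt.get(i, 0)
--         cnt[i] = cnt.get(i, 0) + 1
--         prev = x
--
--     grp_y.sort()
--     sx, dx = [0] * N, [0] * N
--     prev, cnt = -1, {}
--     for y, i in grp_y:
--         if prev != -1 and y != prev: cnt.clear()
--         sx[i] += 1
--         dx[i] += cnt.get(i, 0)
--         cnt[i] = cnt.get(i, 0) + 1
--         prev = y
--
--     res = 0
--     for i in range(N): res += sx[i] * (sx[i] - 1) // 2 - dx[i]
--     for i in range(M): res += sy[i] * (sy[i] - 1) // 2 - dy[i]
--
--     return res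
-- ===== SOURCE B (Python) =====
-- from bisect import bisect_left
-- from collections import Counter
--
-- def solve(N, M, K, X, Y, pts):
--     grp_x, grp_y = [], []
--     for x, y in pts:
--         i = bisect_left(X, x)
--         j = bisect_left(Y, y)
--         if X[i] == x and Y[j] == y: continue
--         if X[i] == x: grp_x.append((x, j))
--         else: grp_y.append((y, i))
--
--     res = 0
--     for grp in (grp_x, grp_y):
--         seg = Counter(i for _, i in grp)
--         cell = Counter(grp)
--         res += sum(c * (c - 1) // 2 for c in seg.values())
--         res -= sum(c * (c - 1) // 2 for c in cell.values())
--     return res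
-- ===== Notes on version B (the rewrite author's own statement) =====
-- stated objective: simpler
-- what changed: The two sort-then-sweep passes with a prev/-1 sentinel and a reset-on-key-change dict are replaced by two Counters per group (per segment index, and per (coordinate, segment) cell) combined with a closed-form sum of c*(c-1)//2 over the counts, removing both O(K log K) sorts and all reset bookkeeping.
-- outside the precondition, e.g. on solve(2, 2, 2, [-1, 5], [0, 5], [(-1, 3), (5, 3)]): A returns 0, B returns 1
import Mathlib
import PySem

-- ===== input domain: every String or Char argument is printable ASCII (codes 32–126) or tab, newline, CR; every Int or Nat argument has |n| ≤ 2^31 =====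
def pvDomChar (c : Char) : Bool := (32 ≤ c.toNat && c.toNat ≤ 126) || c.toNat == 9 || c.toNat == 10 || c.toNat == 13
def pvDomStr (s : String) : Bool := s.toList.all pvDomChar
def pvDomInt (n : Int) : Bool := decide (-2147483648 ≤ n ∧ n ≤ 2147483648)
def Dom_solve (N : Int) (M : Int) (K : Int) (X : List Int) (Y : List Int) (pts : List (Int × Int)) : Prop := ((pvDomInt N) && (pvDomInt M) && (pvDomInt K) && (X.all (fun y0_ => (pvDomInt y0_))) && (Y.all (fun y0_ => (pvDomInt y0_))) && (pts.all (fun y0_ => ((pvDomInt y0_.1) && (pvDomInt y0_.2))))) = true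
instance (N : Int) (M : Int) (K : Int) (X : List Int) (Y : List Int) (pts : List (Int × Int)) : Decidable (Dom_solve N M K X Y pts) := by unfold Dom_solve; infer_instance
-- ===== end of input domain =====

-- B replaces A's two sort-then-sweep passes (prev/-1 sentinel and a reset-on-key-change dict) by
-- two Counters per group and a closed-form sum of c*(c-1)//2 over their values: simpler, no sorting.

-- ===== PORT A =====
-- classification loop shared verbatim by both ports (it is textually identical in A and B).
-- X[i] / Y[j] indexing raises IndexError when the bisect lands at len(X)/len(Y); those inputs
-- are excluded by Pre_solve, so getD is exact where it is reached.
def pvClassify (X Y : List Int) (pts : List (Int × Int)) : List (Int × Nat) × List (Int × Nat) :=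
  pts.foldl (fun acc p =>
      let i := PySem.List.bisectLeft X p.1
      let j := PySem.List.bisectLeft Y p.2
      if X.getD i 0 = p.1 ∧ Y.getD j 0 = p.2 then acc
      else if X.getD i 0 = p.1 then (acc.1 ++ [(p.1, j)], acc.2)
      else (acc.1, acc.2 ++ [(p.2, i)]))
    ([], [])

-- one iteration of A's sweep loop over state (sy, dy, prev, cnt); sy[i] += 1 / dy[i] += cnt.get(i, 0)
-- are exact via Array.setIfInBounds / getD because Pre_solve keeps every index i below len(sy)
def pvSweepStep (st : Array Int × Array Int × Int × PySem.Dict Nat Int) (e : Int × Nat) :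
    Array Int × Array Int × Int × PySem.Dict Nat Int :=
  let cnt := if st.2.2.1 ≠ -1 ∧ e.1 ≠ st.2.2.1 then PySem.Dict.empty else st.2.2.2
  (st.1.setIfInBounds e.2 (st.1.getD e.2 0 + 1),
   st.2.1.setIfInBounds e.2 (st.2.1.getD e.2 0 + cnt.getD e.2 0),
   e.1,
   cnt.insert e.2 (cnt.getD e.2 0 + 1))

-- A's "grp.sort(); sy, dy = [0]*m, [0]*m; prev, cnt = -1, {}; for x, i in grp: ..." block
-- (written twice in A, for grp_x and for grp_y); Python's lists sy, dy are ported as Arrays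
def pvSweep (m : Nat) (g : List (Int × Nat)) : Array Int × Array Int :=
  let st := (PySem.List.sorted2 g (fun p => p.1) (fun p => p.2)).foldl pvSweepStep
    (Array.replicate m 0, Array.replicate m 0, -1, PySem.Dict.empty)
  (st.1, st.2.1)

-- A's "for i in range(n): res += s[i]*(s[i]-1)//2 - d[i]"  (0 ≤ i < n = len s, so toNat is exact)
def pvResSum (n : Int) (s d : Array Int) (res : Int) : Int :=
  (PySem.List.pyRange 0 n).foldl
    (fun r i => r + (PySem.Int.floordiv (s.getD i.toNat 0 * (s.getD i.toNat 0 - 1)) 2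
                      - d.getD i.toNat 0)) res

def solve (N : Int) (M : Int) (K : Int) (X : List Int) (Y : List Int) (pts : List (Int × Int)) : Int :=
  let g := pvClassify X Y pts
  let a := pvSweep M.toNat g.1
  let b := pvSweep N.toNat g.2
  pvResSum M a.1 a.2 (pvResSum N b.1 b.2 0)

-- ===== PORT B =====
-- body of B's "for grp in (grp_x, grp_y)" loop: two Counters and closed-form sums over their values
def pvGroupContrib (g : List (Int × Nat)) : Int :=
  let seg := PySem.Dict.counter (g.map (fun p => p.2))
  let cell := PySem.Dict.counter g
  (seg.values.map (fun c => PySem.Int.floordiv (c * (c - 1)) 2)).sum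
    - (cell.values.map (fun c => PySem.Int.floordiv (c * (c - 1)) 2)).sum

def solve_alt (N : Int) (M : Int) (K : Int) (X : List Int) (Y : List Int) (pts : List (Int × Int)) : Int :=
  let g := pvClassify X Y pts
  0 + pvGroupContrib g.1 + pvGroupContrib g.2

-- ===== PRECONDITION & SPEC =====
-- Pre_solve states exactly the inputs A handles: for every point, the bisect probe into X must
-- land inside X (else A raises IndexError on X[i]); when the point sits on a vertical street the
-- probe into Y must land inside Y and, if the point is off the horizontal streets, its segment
-- index must be below M (else sy[j] raises) and its x-coordinate must not be -1, which collides
-- with A's prev = -1 sentinel and can make A skip a cnt reset (grid coordinates are nonnegative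
-- in the original problem); symmetrically for points off the vertical streets.
def Pre_solve (N : Int) (M : Int) (K : Int) (X : List Int) (Y : List Int) (pts : List (Int × Int)) : Prop :=
  ∀ p ∈ pts,
    PySem.List.bisectLeft X p.1 < X.length ∧
    (X.getD (PySem.List.bisectLeft X p.1) 0 = p.1 → PySem.List.bisectLeft Y p.2 < Y.length) ∧
    (X.getD (PySem.List.bisectLeft X p.1) 0 = p.1 →
      ¬ Y.getD (PySem.List.bisectLeft Y p.2) 0 = p.2 →
      p.1 ≠ -1 ∧ ((PySem.List.bisectLeft Y p.2 : Nat) : Int) < M) ∧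
    (¬ X.getD (PySem.List.bisectLeft X p.1) 0 = p.1 →
      p.2 ≠ -1 ∧ ((PySem.List.bisectLeft X p.1 : Nat) : Int) < N)
instance (N : Int) (M : Int) (K : Int) (X : List Int) (Y : List Int) (pts : List (Int × Int)) : Decidable (Pre_solve N M K X Y pts) := by unfold Pre_solve; infer_instance

def pvWitness_solve : Int × Int × Int × List Int × List Int × (List (Int × Int)) :=
  (2, 2, 1, [0, 5], [0, 5], [(0, 3)])

def Spec_solve (N : Int) (M : Int) (K : Int) (X : List Int) (Y : List Int) (pts : List (Int × Int)) (out : Int) : Prop := out = solve_alt N M K X Y pts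
instance (N : Int) (M : Int) (K : Int) (X : List Int) (Y : List Int) (pts : List (Int × Int)) (out : Int) : Decidable (Spec_solve N M K X Y pts out) := by unfold Spec_solve; infer_instance

-- ===== CLAIM (what is proved, stated in full; the proofs are below) =====
def Claim_equal_solve : Prop := ∀ (N : Int) (M : Int) (K : Int) (X : List Int) (Y : List Int) (pts : List (Int × Int)), Dom_solve N M K X Y pts → Pre_solve N M K X Y pts → Spec_solve N M K X Y pts (solve N M K X Y pts)

-- ===== LEMMAS AND PROOFS =====

def pvEqPairs {α : Type} [BEq α] : List α → Nat
  | [] => 0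
  | e :: t => t.count e + pvEqPairs t

lemma pvEqPairs_concat {α : Type} [BEq α] [LawfulBEq α] (l : List α) (e : α) :
    pvEqPairs (l ++ [e]) = pvEqPairs l + l.count e := by
  induction l with
  | nil => simp [pvEqPairs]
  | cons a t ih =>
    simp only [List.cons_append, pvEqPairs, ih, List.count_append, List.count_cons, List.count_nil]
    by_cases h : e = a
    · subst h; simp; omega
    · have h' : ¬ a = e := fun hh => h hh.symm
      simp [h, h']; omega

lemma pvEqPairs_filter {α : Type} [BEq α] [LawfulBEq α] (l : List α) (k : α) :
    pvEqPairs l = (l.count k).choose 2 + pvEqPairs (l.filter (fun a => !(a == k))) := by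
  induction l with
  | nil => simp [pvEqPairs]
  | cons e t ih =>
    by_cases h : e = k
    · subst h
      have hf : (e :: t).filter (fun a => !(a == e)) = t.filter (fun a => !(a == e)) := by simp
      have hc : (e :: t).count e = t.count e + 1 := by simp
      rw [hf, hc]
      have : (t.count e + 1).choose 2 = t.count e + (t.count e).choose 2 := by
        rw [Nat.choose_succ_succ']; simp [Nat.choose_one_right]
      simp only [pvEqPairs]; omega
    · have h' : ¬ e = k := h
      have hf : (e :: t).filter (fun a => !(a == k)) = e :: t.filter (fun a => !(a == k)) := by
        simp [h]
      have hc : (e :: t).count k = t.count k := by simp [h']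
      rw [hf, hc]
      simp only [pvEqPairs]
      have hce : (t.filter (fun a => !(a == k))).count e = t.count e :=
        List.count_filter (by simp [h'])
      omega

lemma pvSum_choose {α : Type} [BEq α] [LawfulBEq α] :
    ∀ (K l : List α), K.Nodup → (∀ a ∈ l, a ∈ K) →
    (K.map (fun k => (l.count k).choose 2)).sum = pvEqPairs l := by
  intro K
  induction K with
  | nil =>
    intro l _ hsub
    cases l with
    | nil => simp [pvEqPairs]
    | cons a t => exact absurd (hsub a (by simp)) (by simp)
  | cons k K' ih =>
    intro l hnd hsub
    have hndk : k ∉ K' := (List.nodup_cons.mp hnd).1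
    have hnd' : K'.Nodup := (List.nodup_cons.mp hnd).2
    set l' := l.filter (fun a => !(a == k)) with hl'
    have hsub' : ∀ a ∈ l', a ∈ K' := by
      intro a ha
      have hmem := List.mem_of_mem_filter ha
      have hne : ¬ (a = k) := by
        have := List.of_mem_filter ha; simpa using this
      rcases List.mem_cons.mp (hsub a hmem) with h | h
      · exact absurd h hne
      · exact h
      
    have hcounts : ∀ k' ∈ K', l.count k' = l'.count k' := by
      intro k' hk'
      have hne : ¬ (k' = k) := fun h => hndk (h ▸ hk')
      exact (List.count_filter (by simp [hne])).symm
    have : (K'.map (fun k0 => (l.count k0).choose 2)).sum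
         = (K'.map (fun k0 => (l'.count k0).choose 2)).sum := by
      congr 1
      exact List.map_congr_left (fun a ha => by rw [hcounts a ha])
    simp only [List.map_cons, List.sum_cons, this, ih l' hnd' hsub']
    exact (pvEqPairs_filter l k).symm

lemma pvEqPairs_perm {α : Type} [BEq α] [LawfulBEq α] {l l' : List α} (h : l.Perm l') :
    pvEqPairs l = pvEqPairs l' := by
  have h1 := pvSum_choose (PySem.Set.ofList l) l (PySem.Set.nodup_ofList l)
    (fun a ha => (PySem.Set.mem_ofList l a).mpr ha)
  have h2 := pvSum_choose (PySem.Set.ofList l) l' (PySem.Set.nodup_ofList l)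
    (fun a ha => (PySem.Set.mem_ofList l a).mpr (h.mem_iff.mpr ha))
  rw [← h1, ← h2]
  congr 1
  exact List.map_congr_left (fun a _ => by rw [h.count_eq])

lemma pvC2_cast (c : Nat) :
    PySem.Int.floordiv ((c : Int) * ((c : Int) - 1)) 2 = ((c.choose 2 : Nat) : Int) := by
  cases c with
  | zero => decide
  | succ n =>
    have h1 : ((n+1 : Nat) : Int) * (((n+1 : Nat) : Int) - 1) = (((n+1) * n : Nat) : Int) := by
      push_cast; ring
    rw [h1]
    have h2 := PySem.Int.floordiv_natCast ((n+1)*n) 2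
    have h3 : ((n+1 : Nat)).choose 2 = (n+1) * n / 2 := by
      rw [Nat.choose_two_right]; simp
    rw [h3]
    exact_mod_cast h2

lemma pvSumCast {α : Type} (l : List α) (f : α → Nat) :
    (l.map (fun a => ((f a : Nat) : Int))).sum = (((l.map f).sum : Nat) : Int) := by
  induction l with
  | nil => simp
  | cons a t ih => simp [ih]

lemma pvCounterSum {α : Type} [BEq α] [LawfulBEq α] (xs : List α) :
    ((PySem.Dict.counter xs).values.map (fun c => PySem.Int.floordiv (c * (c - 1)) 2)).sum
      = (pvEqPairs xs : Int) := by
  have hv : (PySem.Dict.counter xs).values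
      = (PySem.Set.ofList xs).map (fun k => ((xs.count k : Nat) : Int)) := by
    show ((PySem.Dict.counter xs).items).map (fun p => p.2) = _
    rw [PySem.Dict.items_counter]
    simp
  rw [hv, List.map_map]
  have : ((fun c => PySem.Int.floordiv (c * (c - 1)) 2) ∘ fun k => ((xs.count k : Nat) : Int))
       = fun k => (((xs.count k).choose 2 : Nat) : Int) := by
    funext k; simp only [Function.comp]; exact pvC2_cast _
  rw [this]
  rw [pvSumCast (f := fun k => (xs.count k).choose 2)]
  congr 1
  exact pvSum_choose (PySem.Set.ofList xs) xs (PySem.Set.nodup_ofList xs)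
    (fun a ha => (PySem.Set.mem_ofList xs a).mpr ha)

lemma pvGroupContrib_eq (g : List (Int × Nat)) :
    pvGroupContrib g = (pvEqPairs (g.map (fun p => p.2)) : Int) - (pvEqPairs g : Int) := by
  show ((PySem.Dict.counter (g.map (fun p => p.2))).values.map
      (fun c => PySem.Int.floordiv (c * (c - 1)) 2)).sum
    - ((PySem.Dict.counter g).values.map (fun c => PySem.Int.floordiv (c * (c - 1)) 2)).sum = _
  rw [pvCounterSum, pvCounterSum]

lemma pvClassifyAux_mem (X Y : List Int) :
    ∀ (pts : List (Int × Int)) (acc : List (Int × Nat) × List (Int × Nat)),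
    (∀ q ∈ (pts.foldl (fun acc p =>
      let i := PySem.List.bisectLeft X p.1
      let j := PySem.List.bisectLeft Y p.2
      if X.getD i 0 = p.1 ∧ Y.getD j 0 = p.2 then acc
      else if X.getD i 0 = p.1 then (acc.1 ++ [(p.1, j)], acc.2)
      else (acc.1, acc.2 ++ [(p.2, i)])) acc).1,
      q ∈ acc.1 ∨ ∃ p ∈ pts, (q.1 = p.1 ∧ q.2 = PySem.List.bisectLeft Y p.2) ∧
        X.getD (PySem.List.bisectLeft X p.1) 0 = p.1 ∧
        ¬ Y.getD (PySem.List.bisectLeft Y p.2) 0 = p.2) ∧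
    (∀ q ∈ (pts.foldl (fun acc p =>
      let i := PySem.List.bisectLeft X p.1
      let j := PySem.List.bisectLeft Y p.2
      if X.getD i 0 = p.1 ∧ Y.getD j 0 = p.2 then acc
      else if X.getD i 0 = p.1 then (acc.1 ++ [(p.1, j)], acc.2)
      else (acc.1, acc.2 ++ [(p.2, i)])) acc).2,
      q ∈ acc.2 ∨ ∃ p ∈ pts, (q.1 = p.2 ∧ q.2 = PySem.List.bisectLeft X p.1) ∧
        ¬ X.getD (PySem.List.bisectLeft X p.1) 0 = p.1) := by
  intro pts
  induction pts with
  | nil => intro acc; constructor <;> (intro q hq; exact Or.inl hq)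
  | cons p rest ih =>
    intro acc
    simp only [List.foldl_cons]
    constructor
    · intro q hq
      rcases (ih _).1 q hq with hacc | ⟨p', hp', h1, h2⟩
      · by_cases c1 : X.getD (PySem.List.bisectLeft X p.1) 0 = p.1 ∧
            Y.getD (PySem.List.bisectLeft Y p.2) 0 = p.2
        · rw [if_pos c1] at hacc; exact Or.inl hacc
        · rw [if_neg c1] at hacc
          by_cases c2 : X.getD (PySem.List.bisectLeft X p.1) 0 = p.1
          · rw [if_pos c2] at hacc
            rcases List.mem_append.mp hacc with h | h
            · exact Or.inl h
            · simp at h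
              exact Or.inr ⟨p, by simp, ⟨by simp [h], by simp [h]⟩, c2,
                fun hy => c1 ⟨c2, hy⟩⟩
          · rw [if_neg c2] at hacc
            exact Or.inl hacc
      · exact Or.inr ⟨p', by simp [hp'], h1, h2⟩
    · intro q hq
      rcases (ih _).2 q hq with hacc | ⟨p', hp', h1, h2⟩
      · by_cases c1 : X.getD (PySem.List.bisectLeft X p.1) 0 = p.1 ∧
            Y.getD (PySem.List.bisectLeft Y p.2) 0 = p.2
        · rw [if_pos c1] at hacc; exact Or.inl hacc
        · rw [if_neg c1] at hacc
          by_cases c2 : X.getD (PySem.List.bisectLeft X p.1) 0 = p.1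
          · rw [if_pos c2] at hacc; exact Or.inl hacc
          · rw [if_neg c2] at hacc
            rcases List.mem_append.mp hacc with h | h
            · exact Or.inl h
            · simp at h
              exact Or.inr ⟨p, by simp, ⟨by simp [h], by simp [h]⟩, c2⟩
      · exact Or.inr ⟨p', by simp [hp'], h1, h2⟩

lemma pvClassify_mem (X Y : List Int) (pts : List (Int × Int)) :
    (∀ q ∈ (pvClassify X Y pts).1, ∃ p ∈ pts, (q.1 = p.1 ∧ q.2 = PySem.List.bisectLeft Y p.2) ∧
        X.getD (PySem.List.bisectLeft X p.1) 0 = p.1 ∧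
        ¬ Y.getD (PySem.List.bisectLeft Y p.2) 0 = p.2) ∧
    (∀ q ∈ (pvClassify X Y pts).2, ∃ p ∈ pts, (q.1 = p.2 ∧ q.2 = PySem.List.bisectLeft X p.1) ∧
        ¬ X.getD (PySem.List.bisectLeft X p.1) 0 = p.1) := by
  have h := pvClassifyAux_mem X Y pts ([], [])
  constructor
  · intro q hq
    rcases h.1 q hq with hacc | hex
    · simp at hacc
    · exact hex
  · intro q hq
    rcases h.2 q hq with hacc | hex
    · simp at hacc
    · exact hex

lemma pvSorted2_lt_eq (a b : Int × Nat) :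
    (decide (a.1 < b.1) || (!decide (b.1 < a.1) && decide (a.2 < b.2)))
      = decide (toLex a < toLex b) := by
  rcases lt_trichotomy a.1 b.1 with h | h | h
  · simp [h, Prod.Lex.toLex_lt_toLex, not_lt.mpr (le_of_lt h)]
  · simp [Prod.Lex.toLex_lt_toLex, h]
  · simp [Prod.Lex.toLex_lt_toLex, h, not_lt.mpr (le_of_lt h)]
    intro hh; omega

lemma pvSorted2_pairwise (g : List (Int × Nat)) :
    (PySem.List.sorted2 g (fun p => p.1) (fun p => p.2)).Pairwise (fun a b => a.1 ≤ b.1) := by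
  have key : ∀ (l : List (Int × Nat)) (acc : List (Int × Nat)),
      acc.Pairwise (fun a b => toLex a ≤ toLex b) →
      (l.foldl (fun acc x => PySem.List.insertBy
        (fun a b => decide ((fun p => toLex p : Int × Nat → Lex (Int × Nat)) a
          < (fun p => toLex p) b)) x acc) acc).Pairwise
        (fun a b => toLex a ≤ toLex b) := by
    intro l
    induction l with
    | nil => intro acc h; exact h
    | cons x t ih =>
      intro acc h
      exact ih _ (PySem.List.insertBy_pairwise_le (fun p => toLex p) x acc h)
  have heq : PySem.List.sorted2 g (fun p => p.1) (fun p => p.2)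
      = g.foldl (fun acc x => PySem.List.insertBy
        (fun a b => decide ((fun p => toLex p : Int × Nat → Lex (Int × Nat)) a
          < (fun p => toLex p) b)) x acc) [] := by
    show g.foldl (fun acc x => PySem.List.insertBy _ x acc) [] = _
    congr 1
    funext acc x
    congr 1
    funext a b
    exact pvSorted2_lt_eq a b
  rw [heq]
  have h := key g [] (by simp)
  exact h.imp (fun hab => by
    rcases Prod.Lex.toLex_le_toLex.mp hab with h1 | ⟨h1, _⟩
    · exact le_of_lt h1
    · exact le_of_eq h1)

lemma pvLe_getLast (l : List (Int × Nat)) (hp : l.Pairwise (fun a b => a.1 ≤ b.1)) :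
    ∀ (hne : l ≠ []) (a : Int × Nat), a ∈ l → a.1 ≤ (l.getLast hne).1 := by
  induction l with
  | nil => intro hne; exact absurd rfl hne
  | cons x t ih =>
    intro hne a ha
    cases t with
    | nil => simp at ha; simp [ha]
    | cons y t' =>
      rw [List.getLast_cons (by simp)]
      rcases List.mem_cons.mp ha with h | h
      · subst h
        calc a.1 ≤ ((y :: t').getLast (by simp)).1 :=
              (List.pairwise_cons.mp hp).1 _ (List.getLast_mem _)
          _ = _ := rfl
      · exact ih (List.pairwise_cons.mp hp).2 (by simp) a h

lemma pvGetD_set (l : List Int) (i k : Nat) (v : Int) (hi : i < l.length) :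
    (l.set i v).getD k 0 = if k = i then v else l.getD k 0 := by
  rw [List.getD_eq_getElem?_getD, List.getD_eq_getElem?_getD, List.getElem?_set]
  by_cases h : k = i
  · simp [h, hi]
  · rw [if_neg (fun hh => h hh.symm), if_neg h]

lemma pvSum_set (l : List Int) (i : Nat) (v : Int) (hi : i < l.length) :
    (l.set i v).sum = l.sum - l.getD i 0 + v := by
  rw [List.sum_set]
  have hdrop : l.drop i = l[i] :: l.drop (i + 1) := List.drop_eq_getElem_cons hi
  have hsum : (l.take i).sum + (l.drop i).sum = l.sum := List.sum_take_add_sum_drop l i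
  rw [hdrop] at hsum
  have hg : l.getD i 0 = l[i] := List.getD_eq_getElem l 0 hi
  simp only [List.sum_cons] at hsum
  rw [if_pos hi, hg]
  omega
-- list-level model of pvSweepStep, used only by the proofs
def pvSweepStepL (st : List Int × List Int × Int × PySem.Dict Nat Int) (e : Int × Nat) :
    List Int × List Int × Int × PySem.Dict Nat Int :=
  let cnt := if st.2.2.1 ≠ -1 ∧ e.1 ≠ st.2.2.1 then PySem.Dict.empty else st.2.2.2
  (st.1.set e.2 (st.1.getD e.2 0 + 1),
   st.2.1.set e.2 (st.2.1.getD e.2 0 + cnt.getD e.2 0),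
   e.1,
   cnt.insert e.2 (cnt.getD e.2 0 + 1))

lemma pvArr_getD (a : Array Int) (i : Nat) (d : Int) : a.getD i d = a.toList.getD i d := by
  rw [Array.getD_eq_getD_getElem?, List.getD_eq_getElem?_getD, ← Array.getElem?_toList]

lemma pvStep_toList (st : Array Int × Array Int × Int × PySem.Dict Nat Int) (e : Int × Nat) :
    ((pvSweepStep st e).1.toList, (pvSweepStep st e).2.1.toList,
     (pvSweepStep st e).2.2.1, (pvSweepStep st e).2.2.2)
      = pvSweepStepL (st.1.toList, st.2.1.toList, st.2.2.1, st.2.2.2) e := by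
  simp [pvSweepStep, pvSweepStepL, Array.toList_setIfInBounds, pvArr_getD]

lemma pvFold_toList :
    ∀ (l : List (Int × Nat)) (st : Array Int × Array Int × Int × PySem.Dict Nat Int),
    ((l.foldl pvSweepStep st).1.toList, (l.foldl pvSweepStep st).2.1.toList,
     (l.foldl pvSweepStep st).2.2.1, (l.foldl pvSweepStep st).2.2.2)
      = l.foldl pvSweepStepL (st.1.toList, st.2.1.toList, st.2.2.1, st.2.2.2) := by
  intro l
  induction l with
  | nil => intro st; rfl
  | cons e t ih =>
    intro st
    simp only [List.foldl_cons]
    rw [ih (pvSweepStep st e), pvStep_toList]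

lemma pvSweepLoop_inv (m : Nat) :
    ∀ (rest p : List (Int × Nat)) (sy dy : List Int) (prev : Int) (cnt : PySem.Dict Nat Int),
    (p ++ rest).Pairwise (fun a b => a.1 ≤ b.1) →
    (∀ q ∈ p ++ rest, q.1 ≠ -1) → (∀ q ∈ p ++ rest, q.2 < m) →
    sy.length = m → dy.length = m →
    (∀ k, sy.getD k 0 = (((p.map (fun q => q.2)).count k : Nat) : Int)) →
    dy.sum = (pvEqPairs p : Int) →
    (∀ hne : p ≠ [], prev = (p.getLast hne).1) → (p = [] → prev = -1) →
    (∀ k : Nat, cnt.getD k 0 = ((p.count (prev, k) : Nat) : Int)) →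
    ((rest.foldl pvSweepStepL (sy, dy, prev, cnt)).1.length = m ∧
     (rest.foldl pvSweepStepL (sy, dy, prev, cnt)).2.1.length = m ∧
     (∀ k, (rest.foldl pvSweepStepL (sy, dy, prev, cnt)).1.getD k 0
        = ((((p ++ rest).map (fun q => q.2)).count k : Nat) : Int)) ∧
     (rest.foldl pvSweepStepL (sy, dy, prev, cnt)).2.1.sum = (pvEqPairs (p ++ rest) : Int)) := by
  intro rest
  induction rest with
  | nil =>
    intro p sy dy prev cnt hpw hk hj hsl hdl hsy hdy hprev hprev0 hcnt
    simp only [List.foldl_nil, List.append_nil]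
    exact ⟨hsl, hdl, hsy, hdy⟩
  | cons e rest' ih =>
    intro p sy dy prev cnt hpw hk hj hsl hdl hsy hdy hprev hprev0 hcnt
    have hassoc : p ++ e :: rest' = (p ++ [e]) ++ rest' := by simp
    have hem : e ∈ p ++ e :: rest' := by simp
    have hjm : e.2 < m := hj e hem
    -- the (possibly cleared) cnt of this iteration
    set cnt1 := if prev ≠ -1 ∧ e.1 ≠ prev then PySem.Dict.empty else cnt with hcnt1def
    have hcnt1 : ∀ k : Nat, cnt1.getD k 0 = ((p.count (e.1, k) : Nat) : Int) := by
      intro k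
      by_cases hp : p = []
      · subst hp
        have : prev = -1 := hprev0 rfl
        rw [hcnt1def, if_neg (by simp [this])]
        simpa using hcnt k
      · by_cases hxe : e.1 = prev
        · rw [hcnt1def, if_neg (by simp [hxe])]
          rw [hcnt k, hxe]
        · have hlast : prev = (p.getLast hp).1 := hprev hp
          have hlm : p.getLast hp ∈ p ++ e :: rest' :=
            List.mem_append_left _ (List.getLast_mem hp)
          have hpne : prev ≠ -1 := hlast ▸ hk _ hlm
          rw [hcnt1def, if_pos ⟨hpne, hxe⟩]
          have hcount0 : p.count (e.1, k) = 0 := by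
            rw [List.count_eq_zero]
            intro hmem
            have h1 : e.1 ≤ prev := by
              have := pvLe_getLast p (hpw.sublist (List.sublist_append_left p _)) hp _ hmem
              rw [← hlast] at this; exact this
            have h2 : prev ≤ e.1 := by
              have := (List.pairwise_append.mp hpw).2.2 _ (List.getLast_mem hp) e (by simp)
              rw [← hlast] at this; exact this
            exact hxe (le_antisymm h1 h2)
          rw [hcount0]
          simp [PySem.Dict.getD_empty]
      
    have hcnte : cnt1.getD e.2 0 = ((p.count e : Nat) : Int) := by
      have := hcnt1 e.2
      rwa [Prod.mk.eta] at this
    simp only [List.foldl_cons]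
    have hstep : pvSweepStepL (sy, dy, prev, cnt) e =
        (sy.set e.2 (sy.getD e.2 0 + 1),
         dy.set e.2 (dy.getD e.2 0 + cnt1.getD e.2 0),
         e.1,
         cnt1.insert e.2 (cnt1.getD e.2 0 + 1)) := rfl
    rw [hstep, hassoc]
    apply ih (p ++ [e])
    · rw [← hassoc]; exact hpw
    · rw [← hassoc]; exact hk
    · rw [← hassoc]; exact hj
    · simp [hsl]
    · simp [hdl]
    · -- sy invariant
      intro k
      rw [pvGetD_set sy e.2 k _ (by omega)]
      simp only [List.map_append, List.count_append, List.map_cons, List.map_nil]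
      by_cases h : k = e.2
      · rw [if_pos h, hsy e.2, h]
        have h1 : List.count e.2 [e.2] = 1 := by rw [List.count_singleton]; simp
        rw [h1]
        push_cast; ring
      · rw [if_neg h, hsy k]
        have h1 : List.count k [e.2] = 0 := List.count_eq_zero.mpr (by simp [h])
        rw [h1]
        push_cast; ring
    · -- dy sum invariant
      rw [pvSum_set dy e.2 (dy.getD e.2 0 + cnt1.getD e.2 0) (by omega), hdy, hcnte, pvEqPairs_concat]
      push_cast; ring
    · -- prev = last
      intro hne
      rw [List.getLast_concat]
    · intro habs; simp at habs
    · -- cnt invariant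
      intro k
      rw [PySem.Dict.getD_insert]
      by_cases h : k = e.2
      · rw [if_pos h, hcnt1 e.2, List.count_append, h]
        have h1 : List.count (e.1, e.2) [e] = 1 := by
          rw [Prod.mk.eta, List.count_singleton]; simp
        rw [h1]
        push_cast; ring
      · rw [if_neg h, hcnt1 k, List.count_append]
        have h1 : List.count (e.1, k) [e] = 0 := List.count_eq_zero.mpr (by
          intro hm
          rw [List.mem_singleton, Prod.ext_iff] at hm
          exact h hm.2)
        rw [h1]
        push_cast; ring

lemma pvSweep_spec (m : Nat) (g : List (Int × Nat))
    (hk : ∀ q ∈ g, q.1 ≠ -1) (hj : ∀ q ∈ g, q.2 < m) :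
    (pvSweep m g).1.toList.length = m ∧ (pvSweep m g).2.toList.length = m ∧
    (∀ k, (pvSweep m g).1.toList.getD k 0 = (((g.map (fun q => q.2)).count k : Nat) : Int)) ∧
    (pvSweep m g).2.toList.sum = (pvEqPairs g : Int) := by
  have hperm : (PySem.List.sorted2 g (fun p => p.1) (fun p => p.2)).Perm g :=
    PySem.List.sorted2_perm g (fun p => p.1) (fun p => p.2) false
  have hinv := pvSweepLoop_inv m (PySem.List.sorted2 g (fun p => p.1) (fun p => p.2)) []
    (List.replicate m 0) (List.replicate m 0) (-1) PySem.Dict.empty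
    (by simpa using pvSorted2_pairwise g)
    (by simpa using fun q hq => hk q (hperm.mem_iff.mp hq))
    (by simpa using fun q hq => hj q (hperm.mem_iff.mp hq))
    (by simp) (by simp)
    (by intro k; simp)
    (by simp [pvEqPairs])
    (by intro hne; exact absurd rfl hne)
    (by intro _; rfl)
    (by intro k; simp [PySem.Dict.getD_empty])
  simp only [List.nil_append] at hinv
  have hbr := pvFold_toList (PySem.List.sorted2 g (fun p => p.1) (fun p => p.2))
    (Array.replicate m 0, Array.replicate m 0, -1, PySem.Dict.empty)
  simp only [Array.toList_replicate] at hbr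
  have h1 : (pvSweep m g).1.toList
      = ((PySem.List.sorted2 g (fun p => p.1) (fun p => p.2)).foldl pvSweepStepL
          (List.replicate m 0, List.replicate m 0, -1, PySem.Dict.empty)).1 :=
    congrArg (fun z => z.1) hbr
  have h2 : (pvSweep m g).2.toList
      = ((PySem.List.sorted2 g (fun p => p.1) (fun p => p.2)).foldl pvSweepStepL
          (List.replicate m 0, List.replicate m 0, -1, PySem.Dict.empty)).2.1 :=
    congrArg (fun z => z.2.1) hbr
  refine ⟨?_, ?_, ?_, ?_⟩
  · rw [h1]; exact hinv.1
  · rw [h2]; exact hinv.2.1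
  · intro k
    rw [h1, hinv.2.2.1 k]
    rw [List.Perm.count_eq (hperm.map (fun q => q.2)) k]
  · rw [h2, hinv.2.2.2]
    exact congrArg (fun z : Nat => (z : Int)) (pvEqPairs_perm hperm)

lemma pvPyRange_zero (n : Int) :
    PySem.List.pyRange 0 n = List.map (fun k : Nat => (k : Int)) (List.range n.toNat) := by
  by_cases h : 0 ≤ n
  · obtain ⟨m, rfl⟩ : ∃ m : Nat, n = (m : Int) := ⟨n.toNat, (Int.toNat_of_nonneg h).symm⟩
    rw [PySem.List.pyRange_zero_natCast, Int.toNat_natCast]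
  · have h0 : n.toNat = 0 := by omega
    rw [h0]
    show (if (1:Int) = 0 then [] else _) = _
    rw [if_neg one_ne_zero]
    have hc : (if (0:Int) < 1 then if (0:Int) < n then ((n - 0 + 1 - 1) / 1).toNat else 0
        else if n < 0 then ((0 - n + -1 - 1) / -1).toNat else 0) = 0 := by
      rw [if_pos (by norm_num), if_neg (by omega)]
    simp only [hc]
    simp

lemma pvSumGetD (l : List Int) :
    (List.map (fun i => l.getD i 0) (List.range l.length)).sum = l.sum := by
  congr 1
  apply List.ext_getElem (by simp)
  intro i h1 h2
  simp only [List.getElem_map, List.getElem_range]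
  exact List.getD_eq_getElem l 0 (by simpa using h2)

lemma pvSumMapSub {α : Type} (l : List α) (f g : α → Int) :
    (l.map (fun a => f a - g a)).sum = (l.map f).sum - (l.map g).sum := by
  induction l with
  | nil => simp
  | cons a t ih => simp [ih]; ring

lemma pvResSum_eq (n : Int) (s d : Array Int) (r : Int) (hd : d.toList.length = n.toNat) :
    pvResSum n s d r
      = r + (List.map (fun i => PySem.Int.floordiv (s.toList.getD i 0 * (s.toList.getD i 0 - 1)) 2)
          (List.range n.toNat)).sum - d.toList.sum := by
  unfold pvResSum
  rw [PySem.List.foldl_add, pvPyRange_zero]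
  have h1 : List.map (fun i : Int => PySem.Int.floordiv (s.getD i.toNat 0 * (s.getD i.toNat 0 - 1)) 2
        - d.getD i.toNat 0) (List.map (fun k : Nat => (k : Int)) (List.range n.toNat))
      = List.map (fun k : Nat => PySem.Int.floordiv (s.toList.getD k 0 * (s.toList.getD k 0 - 1)) 2
        - d.toList.getD k 0) (List.range n.toNat) := by
    rw [List.map_map]
    exact List.map_congr_left (fun a _ => by simp [pvArr_getD])
  rw [h1, pvSumMapSub]
  rw [← hd, pvSumGetD]
  ring

lemma pvGroupTotal (mI : Int) (g : List (Int × Nat)) (r : Int)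
    (hk : ∀ q ∈ g, q.1 ≠ -1) (hj : ∀ q ∈ g, q.2 < mI.toNat) :
    pvResSum mI (pvSweep mI.toNat g).1 (pvSweep mI.toNat g).2 r = r + pvGroupContrib g := by
  obtain ⟨h1, h2, h3, h4⟩ := pvSweep_spec mI.toNat g hk hj
  rw [pvResSum_eq mI _ _ r h2, h4, pvGroupContrib_eq]
  have hmap : List.map (fun i => PySem.Int.floordiv ((pvSweep mI.toNat g).1.toList.getD i 0
        * ((pvSweep mI.toNat g).1.toList.getD i 0 - 1)) 2) (List.range mI.toNat)
      = List.map (fun i => ((((g.map (fun q => q.2)).count i).choose 2 : Nat) : Int))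
          (List.range mI.toNat) :=
    List.map_congr_left (fun i _ => by rw [h3 i]; exact pvC2_cast _)
  rw [hmap, pvSumCast (l := List.range mI.toNat)
      (f := fun i => ((g.map (fun q => q.2)).count i).choose 2)]
  have hsum : (List.map (fun i => ((g.map (fun q => q.2)).count i).choose 2)
      (List.range mI.toNat)).sum = pvEqPairs (g.map (fun q => q.2)) := by
    apply pvSum_choose
    · exact List.nodup_range
    · intro a ha
      rcases List.mem_map.mp ha with ⟨q, hq, rfl⟩
      exact List.mem_range.mpr (hj q hq)
  rw [hsum]
  ring

lemma pvMain (N : Int) (M : Int) (K : Int) (X : List Int) (Y : List Int)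
    (pts : List (Int × Int)) (hpre : Pre_solve N M K X Y pts) :
    pvResSum M (pvSweep M.toNat (pvClassify X Y pts).1).1 (pvSweep M.toNat (pvClassify X Y pts).1).2
      (pvResSum N (pvSweep N.toNat (pvClassify X Y pts).2).1 (pvSweep N.toNat (pvClassify X Y pts).2).2 0)
    = 0 + pvGroupContrib (pvClassify X Y pts).1 + pvGroupContrib (pvClassify X Y pts).2 := by
  have hmem := pvClassify_mem X Y pts
  have Hgx : ∀ q ∈ (pvClassify X Y pts).1, q.1 ≠ -1 ∧ q.2 < M.toNat := by
    intro q hq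
    rcases hmem.1 q hq with ⟨p, hp, ⟨hq1, hq2⟩, hcx, hcy⟩
    obtain ⟨_, _, h3, _⟩ := hpre p hp
    obtain ⟨hne, hlt⟩ := h3 hcx hcy
    exact ⟨hq1 ▸ hne, by rw [hq2]; omega⟩
  have Hgy : ∀ q ∈ (pvClassify X Y pts).2, q.1 ≠ -1 ∧ q.2 < N.toNat := by
    intro q hq
    rcases hmem.2 q hq with ⟨p, hp, ⟨hq1, hq2⟩, hcx⟩
    obtain ⟨_, _, _, h4⟩ := hpre p hp
    obtain ⟨hne, hlt⟩ := h4 hcx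
    exact ⟨hq1 ▸ hne, by rw [hq2]; omega⟩
  rw [pvGroupTotal N _ 0 (fun q hq => (Hgy q hq).1) (fun q hq => (Hgy q hq).2)]
  rw [pvGroupTotal M _ _ (fun q hq => (Hgx q hq).1) (fun q hq => (Hgx q hq).2)]
  ring

-- ===== VERDICT (by name: the statement is the Claim_ definition above) =====
theorem solve_spec : Claim_equal_solve := by
  intro N M K X Y pts _hdom hpre
  show solve N M K X Y pts = solve_alt N M K X Y pts
  exact pvMain N M K X Y pts hpre
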